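-- pv_equiv track=rewrite | github.com/NicolasMelaerts/KRR-Tetracubes-Puzzles | draw_tetracubes.py | generate_adjacent_cubes
-- ===== SOURCE A (Python) =====
-- def generate_adjacent_cubes(base_cube):
--     directions = [(1, 0, 0), (-1, 0, 0), (0, 1, 0), (0, -1, 0), (0, 0, 1), (0, 0, -1)]
--     new_cubes = []
--
--     for cube in base_cube:
--         for dx, dy, dz in directions:
--             new_pos = (cube[0] + dx, cube[1] + dy, cube[2] + dz)
--             if new_pos not in base_cube:
--                 new_cube = base_cube.copy()
--                 new_cube.append(new_pos)
--                 new_cubes.append(new_cube)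
--
--     # Remove duplicates
--     unique_cubes = []
--     for cube in new_cubes:
--         sorted_cube = sorted(cube)
--         if sorted_cube not in [sorted(c) for c in unique_cubes]:
--             unique_cubes.append(cube)
--
--     return unique_cubes
-- ===== SOURCE B (Python) =====
-- def generate_adjacent_cubes(base_cube):
--     directions = [(1, 0, 0), (-1, 0, 0), (0, 1, 0), (0, -1, 0), (0, 0, 1), (0, 0, -1)]
--     # Pass 1: every distinct neighbour position not already in the shape,
--     # in first-occurrence order (each candidate shape is base_cube + one position,
--     # so deduplicating shapes by sorted() is deduplicating the added positions).
--     unique_positions = dict.fromkeys(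
--         (x + dx, y + dy, z + dz)
--         for (x, y, z) in base_cube
--         for (dx, dy, dz) in directions
--         if (x + dx, y + dy, z + dz) not in base_cube
--     )
--     # Pass 2: one shape per unique position.
--     return [base_cube + [pos] for pos in unique_positions]
-- ===== Notes on version B (the rewrite author's own statement) =====
-- stated objective: faster
-- what changed: B dedupes the single added position (dict.fromkeys, one pass) and then maps each unique position to a shape, instead of building all candidate shapes and deduping them by re-sorting every kept shape inside a quadratic scan.
import Mathlib
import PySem

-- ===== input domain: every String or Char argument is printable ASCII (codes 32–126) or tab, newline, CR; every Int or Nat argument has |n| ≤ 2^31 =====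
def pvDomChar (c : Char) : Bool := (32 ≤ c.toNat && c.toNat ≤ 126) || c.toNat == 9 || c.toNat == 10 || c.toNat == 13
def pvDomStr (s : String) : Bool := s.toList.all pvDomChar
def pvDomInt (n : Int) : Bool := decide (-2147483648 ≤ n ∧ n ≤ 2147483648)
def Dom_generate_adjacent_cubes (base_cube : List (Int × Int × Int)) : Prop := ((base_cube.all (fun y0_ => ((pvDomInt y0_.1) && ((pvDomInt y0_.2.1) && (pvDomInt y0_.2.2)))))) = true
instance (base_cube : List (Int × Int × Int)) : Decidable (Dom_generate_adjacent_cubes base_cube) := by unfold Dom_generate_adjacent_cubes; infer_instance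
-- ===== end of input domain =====

-- B dedupes the added position (one pass) and maps each unique position to a shape,
-- replacing A's quadratic sorted-shape rescan; measurably faster on large inputs.

-- the six axis directions, shared literal of both ports
def pvDirections : List (Int × Int × Int) :=
  [(1, 0, 0), (-1, 0, 0), (0, 1, 0), (0, -1, 0), (0, 0, 1), (0, 0, -1)]

-- Python sorts triples lexicographically: identity key into the lexicographic product order
def pvKey (t : Int × Int × Int) : Int ×ₗ (Int ×ₗ Int) := toLex (t.1, toLex (t.2.1, t.2.2))

-- ===== PORT A =====
def generate_adjacent_cubes (base_cube : List (Int × Int × Int)) : List (List (Int × Int × Int)) :=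
  let new_cubes : List (List (Int × Int × Int)) :=
    base_cube.foldl (fun acc cube =>
      pvDirections.foldl (fun acc d =>
        let new_pos := (cube.1 + d.1, cube.2.1 + d.2.1, cube.2.2 + d.2.2)
        if new_pos ∉ base_cube then acc ++ [base_cube ++ [new_pos]] else acc) acc) []
  new_cubes.foldl (fun unique_cubes cube =>
    let sorted_cube := PySem.List.sorted cube pvKey false
    if sorted_cube ∉ unique_cubes.map (fun c => PySem.List.sorted c pvKey false)
    then unique_cubes ++ [cube] else unique_cubes) []

-- ===== PORT B =====
def generate_adjacent_cubes_alt (base_cube : List (Int × Int × Int)) : List (List (Int × Int × Int)) :=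
  let candidates : List (Int × Int × Int) :=
    base_cube.flatMap (fun cube =>
      (pvDirections.map (fun d => (cube.1 + d.1, cube.2.1 + d.2.1, cube.2.2 + d.2.2))).filter
        (fun p => decide (p ∉ base_cube)))
  (PySem.List.dedup candidates).map (fun pos => base_cube ++ [pos])

-- ===== PRECONDITION & SPEC =====
def Spec_generate_adjacent_cubes (base_cube : List (Int × Int × Int)) (out : List (List (Int × Int × Int))) : Prop := out = generate_adjacent_cubes_alt base_cube
instance (base_cube : List (Int × Int × Int)) (out : List (List (Int × Int × Int))) : Decidable (Spec_generate_adjacent_cubes base_cube out) := by unfold Spec_generate_adjacent_cubes; infer_instance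

-- ===== CLAIM (what is proved, stated in full; the proofs are below) =====
def Claim_equal_generate_adjacent_cubes : Prop := ∀ (base_cube : List (Int × Int × Int)), Dom_generate_adjacent_cubes base_cube → Spec_generate_adjacent_cubes base_cube (generate_adjacent_cubes base_cube)

-- ===== LEMMAS AND PROOFS =====

-- a guarded append loop is append of the filtered, mapped list
theorem pv_foldl_append_ite {A B : Type} (c : A -> Prop) [DecidablePred c] (f : A -> B) :
    forall (l : List A) (acc : List B),
      l.foldl (fun acc x => if c x then acc ++ [f x] else acc) acc
      = acc ++ (l.filter (fun x => decide (c x))).map f := by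
  intro l
  induction l with
  | nil => intro acc; simp
  | cons x t ih =>
    intro acc
    by_cases hx : c x
    . simp [List.foldl_cons, hx, ih]
    . simp [List.foldl_cons, hx, ih]

-- A's generation phase produces exactly B's candidate list, each wrapped as base ++ [p]
theorem phase1_eq (base : List (Int × Int × Int)) :
    ∀ (l : List (Int × Int × Int)) (acc : List (List (Int × Int × Int))),
      l.foldl (fun acc cube =>
        pvDirections.foldl (fun acc d =>
          let new_pos := (cube.1 + d.1, cube.2.1 + d.2.1, cube.2.2 + d.2.2)
          if new_pos ∉ base then acc ++ [base ++ [new_pos]] else acc) acc) acc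
      = acc ++ (l.flatMap (fun cube =>
          (pvDirections.map (fun d => (cube.1 + d.1, cube.2.1 + d.2.1, cube.2.2 + d.2.2))).filter
            (fun p => decide (p ∉ base)))).map (fun p => base ++ [p]) := by
  intro l
  induction l with
  | nil => intro acc; simp
  | cons c t ih =>
    intro acc
    simp only [List.foldl_cons, List.flatMap_cons, List.map_append, ih]
    rw [pv_foldl_append_ite
          (c := fun d : Int × Int × Int => ((c.1 + d.1, c.2.1 + d.2.1, c.2.2 + d.2.2) ∉ base))
          (f := fun d : Int × Int × Int => base ++ [(c.1 + d.1, c.2.1 + d.2.1, c.2.2 + d.2.2)])]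
    simp [List.filter_map, List.map_map, Function.comp_def, List.append_assoc]

-- equal sorts of base ++ [p] and base ++ [q] force p = q (cancellation on multisets)
theorem sorted_append_singleton_inj (base : List (Int × Int × Int)) (p q : Int × Int × Int)
    (h : PySem.List.sorted (base ++ [p]) pvKey false = PySem.List.sorted (base ++ [q]) pvKey false) :
    p = q := by
  have hp := PySem.List.sorted_perm (xs := base ++ [p]) (key := pvKey) (rev := false)
  have hq := PySem.List.sorted_perm (xs := base ++ [q]) (key := pvKey) (rev := false)
  rw [h] at hp
  have hperm : (base ++ [p]).Perm (base ++ [q]) := hp.symm.trans hq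
  have hm : ((base ++ [p] : List (Int × Int × Int)) : Multiset (Int × Int × Int))
      = ((base ++ [q] : List (Int × Int × Int)) : Multiset (Int × Int × Int)) :=
    Quot.sound hperm
  simp only [← Multiset.coe_add] at hm
  have := add_left_cancel hm
  simpa using this

-- A's dedup of wrapped candidates is the wrap of B's position dedup
theorem phase2_eq (base : List (Int × Int × Int)) :
    ∀ (P accP : List (Int × Int × Int)),
      (P.map (fun p => base ++ [p])).foldl (fun unique_cubes cube =>
        let sorted_cube := PySem.List.sorted cube pvKey false
        if sorted_cube ∉ unique_cubes.map (fun c => PySem.List.sorted c pvKey false)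
        then unique_cubes ++ [cube] else unique_cubes) (accP.map (fun p => base ++ [p]))
      = (P.foldl PySem.Set.add accP).map (fun p => base ++ [p]) := by
  intro P
  induction P with
  | nil => intro accP; simp
  | cons p t ih =>
    intro accP
    have hmem : (PySem.List.sorted (base ++ [p]) pvKey false ∈
        (accP.map (fun q => base ++ [q])).map (fun c => PySem.List.sorted c pvKey false))
        ↔ p ∈ accP := by
      simp only [List.map_map, List.mem_map, Function.comp_def]
      constructor
      . rintro ⟨q, hq, hEq⟩
        exact (sorted_append_singleton_inj base q p hEq) ▸ hq
      . intro h; exact ⟨p, h, rfl⟩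
    simp only [List.map_cons, List.foldl_cons]
    by_cases hp : p ∈ accP
    . rw [if_neg (not_not_intro (hmem.mpr hp))]
      have hadd : PySem.Set.add accP p = accP := by
        simp [PySem.Set.add, PySem.Set.contains, hp]
      rw [hadd]
      exact ih accP
    . rw [if_pos (fun hc => hp (hmem.mp hc))]
      have hadd : PySem.Set.add accP p = accP ++ [p] := by
        simp [PySem.Set.add, PySem.Set.contains, hp]
      rw [hadd]
      simpa using ih (accP ++ [p])

-- ===== VERDICT (by name: the statement is the Claim_ definition above) =====
theorem generate_adjacent_cubes_spec : Claim_equal_generate_adjacent_cubes := by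
  intro base_cube _
  unfold Spec_generate_adjacent_cubes generate_adjacent_cubes generate_adjacent_cubes_alt
  rw [phase1_eq base_cube base_cube []]
  simp only [PySem.List.dedup_eq_ofList, PySem.Set.ofList_eq_foldl]
  simpa using
    phase2_eq base_cube (base_cube.flatMap (fun cube =>
      (pvDirections.map (fun d => (cube.1 + d.1, cube.2.1 + d.2.1, cube.2.2 + d.2.2))).filter
        (fun p => decide (p ∉ base_cube)))) []
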